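-- pv_equiv track=rewrite | github.com/Shane833/Code-Cleaner | Code Cleaner/cleaner.py | is_empty_line
-- ===== SOURCE A (Python) =====
-- def is_empty_line(line) -> bool:
-- 	# go through the line and determines if its just for formatting
-- 	characters = ['\n',' ','\t']
-- 	for l in line:
-- 		if l not in characters:
-- 			return False
-- 		else:
-- 			pass
-- 	return True
-- ===== SOURCE B (Python) =====
-- def is_empty_line(line) -> bool:
-- 	# counting formulation: the line is formatting-only iff the occurrences
-- 	# of the three allowed characters account for its entire length
-- 	return line.count('\n') + line.count(' ') + line.count('\t') == len(line)
-- ===== Notes on version B (the rewrite author's own statement) =====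
-- stated objective: alternative
-- what changed: B replaces the early-return membership scan by an arithmetic identity: it sums the counts of the three allowed characters and compares the sum with the line length.
import Mathlib
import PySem

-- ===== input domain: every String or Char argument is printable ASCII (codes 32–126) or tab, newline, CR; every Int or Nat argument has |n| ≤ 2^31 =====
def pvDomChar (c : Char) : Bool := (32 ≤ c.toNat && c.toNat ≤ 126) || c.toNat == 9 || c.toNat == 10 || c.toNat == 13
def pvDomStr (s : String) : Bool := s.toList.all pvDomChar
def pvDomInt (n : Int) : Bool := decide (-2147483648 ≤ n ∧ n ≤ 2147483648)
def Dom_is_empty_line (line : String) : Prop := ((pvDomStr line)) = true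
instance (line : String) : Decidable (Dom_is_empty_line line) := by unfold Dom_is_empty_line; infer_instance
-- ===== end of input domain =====

-- B replaces A's early-return membership scan by an arithmetic count identity (alternative; same cost).

-- ===== PORT A =====
-- A: scan the characters; return False at the first one outside ['\n',' ','\t'], else True.
def isEmptyLineGo (cs : List Char) : Bool :=
  match cs with
  | [] => true
  | c :: rest =>
    if ¬ (c ∈ ['\n', ' ', '\t']) then false else isEmptyLineGo rest

def is_empty_line (line : String) : Bool := isEmptyLineGo line.toList

-- ===== PORT B =====
-- B: line.count('\n') + line.count(' ') + line.count('\t') == len(line)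
def is_empty_line_alt (line : String) : Bool :=
  ((PySem.Str.count line "\n" : Int) + (PySem.Str.count line " " : Int)
    + (PySem.Str.count line "\t" : Int)) == PySem.Str.len line

-- ===== PRECONDITION & SPEC =====
def Spec_is_empty_line (line : String) (out : Bool) : Prop := out = is_empty_line_alt line
instance (line : String) (out : Bool) : Decidable (Spec_is_empty_line line out) := by unfold Spec_is_empty_line; infer_instance

-- ===== CLAIM (what is proved, stated in full; the proofs are below) =====
def Claim_equal_is_empty_line : Prop := ∀ (line : String), Dom_is_empty_line line → Spec_is_empty_line line (is_empty_line line)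

-- ===== LEMMAS AND PROOFS =====
theorem isEmptyLineGo_iff (cs : List Char) :
    isEmptyLineGo cs = true ↔ ∀ c ∈ cs, c ∈ ['\n', ' ', '\t'] := by
  induction cs with
  | nil => simp [isEmptyLineGo]
  | cons c rest ih =>
    rw [List.forall_mem_cons]
    by_cases h : c ∈ ['\n', ' ', '\t']
    · rw [show isEmptyLineGo (c :: rest) = isEmptyLineGo rest from by
        simp [isEmptyLineGo, h]]
      exact ih.trans (and_iff_right h).symm
    · rw [show isEmptyLineGo (c :: rest) = false from by simp [isEmptyLineGo, h]]
      exact iff_of_false (by simp) fun hk => h hk.1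

-- Chars.count with a single-character needle is List.count.
theorem chars_count_go_singleton (a : Char) (fuel : Nat) (l : List Char) (acc : Nat)
    (h : l.length ≤ fuel) : PySem.Chars.count.go [a] fuel l acc = acc + l.count a := by
  induction l generalizing fuel acc with
  | nil => cases fuel <;> simp [PySem.Chars.count.go]
  | cons c rest ih =>
    cases fuel with
    | zero => simp at h
    | succ n =>
      by_cases hc : c = a
      · subst hc
        rw [show PySem.Chars.count.go [c] (n+1) (c :: rest) acc
              = PySem.Chars.count.go [c] n rest (acc + 1) from by
            simp [PySem.Chars.count.go, List.isPrefixOf]]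
        rw [ih n (acc + 1) (Nat.lt_succ_iff.mp (by simpa using h))]
        simp [List.count_cons]
        omega
      · rw [show PySem.Chars.count.go [a] (n+1) (c :: rest) acc
              = PySem.Chars.count.go [a] n rest acc from by
            simp [PySem.Chars.count.go, List.isPrefixOf, (Ne.symm hc : a ≠ c)]]
        rw [ih n acc (Nat.lt_succ_iff.mp (by simpa using h))]
        simp [List.count_cons, hc]

theorem chars_count_singleton (a : Char) (l : List Char) :
    PySem.Chars.count l [a] = l.count a := by
  rw [show PySem.Chars.count l [a] = PySem.Chars.count.go [a] l.length l 0 from by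
    simp [PySem.Chars.count]]
  simpa using chars_count_go_singleton a l.length l 0 le_rfl

-- the three counts sum to the length exactly when every character is one of the three
theorem count_three (l : List Char) :
    (l.count '\n' + l.count ' ' + l.count '\t' ≤ l.length) ∧
    ((l.count '\n' + l.count ' ' + l.count '\t' = l.length)
      ↔ ∀ c ∈ l, c ∈ ['\n', ' ', '\t']) := by
  induction l with
  | nil => simp
  | cons c rest ih =>
    obtain ⟨ihb, ihe⟩ := ih
    simp only [List.count_cons, List.length_cons, List.forall_mem_cons]
    rw [← ihe]
    by_cases h1 : c = '\n' <;> by_cases h2 : c = ' ' <;> by_cases h3 : c = '\t' <;>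
      simp [h1, h2, h3] <;> omega

-- ===== VERDICT (by name: the statement is the Claim_ definition above) =====
theorem is_empty_line_spec : Claim_equal_is_empty_line := by
  intro line _
  unfold Spec_is_empty_line is_empty_line is_empty_line_alt
  rw [Bool.eq_iff_iff, isEmptyLineGo_iff, beq_iff_eq,
    PySem.Str.count_eq, PySem.Str.count_eq, PySem.Str.count_eq, PySem.Str.len_eq]
  have hn : ("\n" : String).toList = ['\n'] := by decide
  have hs : (" " : String).toList = [' '] := by decide
  have ht : ("\t" : String).toList = ['\t'] := by decide
  rw [hn, hs, ht, chars_count_singleton, chars_count_singleton, chars_count_singleton]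
  rw [← (count_three line.toList).2]
  constructor
  · intro h; exact_mod_cast h
  · intro h; exact_mod_cast h
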